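-- pv_equiv track=rewrite | github.com/avinight/csc165-winter-2022 | Problem Sets/PS4/code/long_prod.py | long_prod
-- ===== SOURCE A (Python) =====
-- def long_prod(lst: list, t: int) -> int:
--     """Return the maximum length of any slice of lst whose product is at most t.
--     Preconditions: t > 0; lst is non-empty; every element of lst is positive.
--     """
--     m = 0  # max length found so far
--     for i in range(1, len(lst) + 1):       # Loop 1
--         j = i - 1
--         p = 1  # product of lst[j+1:i]
--         while j >= 0 and p * lst[j] <= t:  # Loop 2
--             p = p * lst[j]
--             j = j - 1
--         j = j + 1
--         if i - j > m:
--             m = i - j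
--     return m
-- ===== SOURCE B (Python) =====
-- def long_prod(lst: list, t: int) -> int:
--     """Return the maximum length of any slice of lst whose product is at most t.
--     Preconditions: t > 0; lst is non-empty; every element of lst is positive.
--     """
--     n = len(lst)
--     m = 0
--     # frontier of windows of the current length: (end, product) pairs that are
--     # still extendable (every stage of growing the window kept the product <= t)
--     live = [(i, 1) for i in range(1, n + 1)]
--     for k in range(1, n + 1):
--         nxt = []
--         for i, q in live:
--             if i - k >= 0:
--                 q2 = q * lst[i - k]
--                 if q2 <= t:
--                     nxt.append((i, q2))
--         if not nxt:
--             break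
--         m = k
--         live = nxt
--     return m
-- ===== Notes on version B (the rewrite author's own statement) =====
-- stated objective: alternative
-- what changed: Replaces A's per-endpoint backward rescan (restart the product at 1 for every end index and multiply leftwards until it exceeds t) by a level-synchronous frontier over window lengths: one (end, product) pair per still-extendable window, all grown one step per round, stopping when the frontier empties; exact on every input because A's greedy run is prefix-closed in the window length.
import Mathlib
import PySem

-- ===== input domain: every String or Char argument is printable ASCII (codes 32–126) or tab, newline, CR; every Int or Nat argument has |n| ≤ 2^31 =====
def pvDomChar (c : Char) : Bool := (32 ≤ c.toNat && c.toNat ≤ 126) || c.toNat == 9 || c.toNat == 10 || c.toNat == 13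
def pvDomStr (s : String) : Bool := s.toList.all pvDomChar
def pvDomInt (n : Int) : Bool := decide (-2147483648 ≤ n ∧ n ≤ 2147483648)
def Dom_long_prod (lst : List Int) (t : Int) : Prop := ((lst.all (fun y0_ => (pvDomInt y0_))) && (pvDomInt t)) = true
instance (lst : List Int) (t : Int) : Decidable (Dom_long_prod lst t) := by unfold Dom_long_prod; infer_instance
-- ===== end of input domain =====

-- B replaces A's per-endpoint backward rescans by a level-synchronous frontier over window
-- LENGTHS: one (end, product) pair per still-extendable window, all grown one step per round;
-- a different traversal of the same work, exact on every input (total, no Pre_).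

-- ===== PORT A =====
-- inner while-loop of A: state n encodes j = n - 1 (the test 'j >= 0' is 'n > 0'); returns j + 1
def long_prod_inner (lst : List Int) (t : Int) : Nat → Int → Int
  | 0, _ => 0
  | n+1, p =>
    if p * lst.getD n 0 ≤ t then long_prod_inner lst t n (p * lst.getD n 0)
    else ((n : Int) + 1)

def long_prod (lst : List Int) (t : Int) : Int :=
  (PySem.List.pyRange 1 ((lst.length : Int) + 1) 1).foldl
    (fun m i =>
      let j := long_prod_inner lst t i.toNat 1   -- j here is Python's final j (already j + 1)
      if i - j > m then i - j else m) 0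

-- ===== PORT B =====
-- B's inner 'for i, q in live' loop: grow each frontier window one step to length k
def lp_level (lst : List Int) (t : Int) (k : Int) (live : List (Int × Int)) : List (Int × Int) :=
  live.foldl
    (fun nxt iq =>
      if iq.1 - k ≥ 0 then
        (if iq.2 * PySem.List.pyGetD lst (iq.1 - k) 0 ≤ t then
          nxt ++ [(iq.1, iq.2 * PySem.List.pyGetD lst (iq.1 - k) 0)]
        else nxt)
      else nxt) []

-- B's outer 'for k in range(1, n + 1)' loop with its break; state = (m, live)
def lp_loop (lst : List Int) (t : Int) : List Int → Int → List (Int × Int) → Int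
  | [], m, _ => m
  | k :: ks, m, live =>
    let nxt := lp_level lst t k live
    if nxt = [] then m else lp_loop lst t ks k nxt

def long_prod_alt (lst : List Int) (t : Int) : Int :=
  lp_loop lst t (PySem.List.pyRange 1 ((lst.length : Int) + 1) 1) 0
    ((PySem.List.pyRange 1 ((lst.length : Int) + 1) 1).map (fun i => (i, (1 : Int))))

-- ===== PRECONDITION & SPEC =====
def Spec_long_prod (lst : List Int) (t : Int) (out : Int) : Prop := out = long_prod_alt lst t
instance (lst : List Int) (t : Int) (out : Int) : Decidable (Spec_long_prod lst t out) := by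
  unfold Spec_long_prod; infer_instance

-- ===== CLAIM (what is proved, stated in full; the proofs are below) =====
def Claim_equal_long_prod : Prop := ∀ (lst : List Int) (t : Int), Dom_long_prod lst t →
  Spec_long_prod lst t (long_prod lst t)

-- ===== LEMMAS AND PROOFS =====

-- product of the slice lst[j:i]
def sp (lst : List Int) (j i : Nat) : Int := ((lst.drop j).take (i - j)).prod

lemma sp_self (lst : List Int) (j : Nat) : sp lst j j = 1 := by
  simp [sp]

lemma sp_cons (lst : List Int) (j i : Nat) (hj : j < i) (hjl : j < lst.length) :
    sp lst j i = lst.getD j 0 * sp lst (j+1) i := by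
  unfold sp
  rw [List.drop_eq_getElem_cons hjl, show i - j = (i - (j+1)) + 1 by omega,
    List.take_succ_cons, List.prod_cons, List.getD_eq_getElem _ _ hjl]

lemma sp_snoc (lst : List Int) (l k : Nat) (hl : l ≤ k) (hk : k < lst.length) :
    sp lst l (k+1) = sp lst l k * lst.getD k 0 := by
  unfold sp
  rw [show k + 1 - l = (k - l) + 1 by omega, List.take_add_one]
  have hget : (lst.drop l)[k - l]? = some lst[k] := by
    rw [List.getElem?_drop, show l + (k - l) = k by omega]
    exact List.getElem?_eq_getElem hk
  rw [hget]
  simp only [Option.toList_some, List.prod_append, List.prod_cons, List.prod_nil, mul_one]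
  rw [List.getD_eq_getElem _ _ hk]

-- Nat-valued mirror of A's inner loop (the returned j+1 is always a natural number)
def lpN (lst : List Int) (t : Int) : Nat → Int → Nat
  | 0, _ => 0
  | n+1, p => if p * lst.getD n 0 ≤ t then lpN lst t n (p * lst.getD n 0) else n + 1

lemma lp_inner_eq (lst : List Int) (t : Int) : ∀ n p,
    long_prod_inner lst t n p = ((lpN lst t n p : Nat) : Int)
  | 0, _ => rfl
  | n+1, p => by
    simp only [long_prod_inner, lpN]
    split
    · exact lp_inner_eq lst t n _
    · push_cast; ring

-- characterisation of A's inner loop: every product of a suffix of lst[:n] down to the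
-- final j is ≤ t, and the next one (if any) is not
lemma lpN_char (lst : List Int) (t : Int) :
    ∀ n, n ≤ lst.length → ∀ p : Int,
      lpN lst t n p ≤ n ∧ (∀ j', lpN lst t n p ≤ j' → j' < n → p * sp lst j' n ≤ t) ∧
        (0 < lpN lst t n p → ¬ (p * sp lst (lpN lst t n p - 1) n ≤ t)) := by
  intro n
  induction n with
  | zero =>
    intro _ p
    simp only [lpN]
    exact ⟨le_refl _, fun j' _ h => absurd h (by omega), fun h => absurd h (by omega)⟩
  | succ n ih =>
    intro hn p
    have hnl : n < lst.length := by omega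
    simp only [lpN]
    split
    · rename_i hc
      obtain ⟨h1, h2, h3⟩ := ih (by omega) (p * lst.getD n 0)
      refine ⟨by omega, ?_, ?_⟩
      · intro j' hj1 hj2
        rcases Nat.lt_or_ge j' n with hj | hj
        · have := h2 j' hj1 hj
          rw [sp_snoc lst j' n (by omega) hnl]
          linarith [(by ring : p * (sp lst j' n * lst.getD n 0)
            = p * lst.getD n 0 * sp lst j' n)]
        · have hj'n : j' = n := by omega
          rw [hj'n, sp_snoc lst n n (le_refl _) hnl, sp_self]
          linarith
      · intro h0
        have := h3 h0
        rw [sp_snoc lst _ n (by omega) hnl]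
        intro hcon
        exact this (by nlinarith [hcon, (by ring : p * (sp lst (lpN lst t n (p * lst.getD n 0) - 1) n * lst.getD n 0) = p * lst.getD n 0 * sp lst (lpN lst t n (p * lst.getD n 0) - 1) n)])
    · rename_i hc
      refine ⟨le_refl _, fun j' hj1 hj2 => absurd hj2 (by omega), fun _ => ?_⟩
      rw [show n + 1 - 1 = n by omega, sp_snoc lst n n (le_refl _) hnl, sp_self]
      intro hcon
      exact hc (by linarith)

-- the greedy run length A computes for the window ending at index i
def runlen (lst : List Int) (t : Int) (i : Nat) : Nat := i - lpN lst t i 1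

-- frontier membership: the window of length k ending at i survived every round so far
def aliveB (lst : List Int) (t : Int) (i k : Nat) : Bool :=
  decide (k ≤ i) && (List.range i).all (fun j' => decide (i - k ≤ j' → sp lst j' i ≤ t))

lemma aliveB_iff (lst : List Int) (t : Int) (i k : Nat) :
    aliveB lst t i k = true ↔ (k ≤ i ∧ ∀ j', i - k ≤ j' → j' < i → sp lst j' i ≤ t) := by
  unfold aliveB
  rw [Bool.and_eq_true, decide_eq_true_eq, List.all_eq_true]
  constructor
  · rintro ⟨h1, h2⟩
    refine ⟨h1, fun j' hj1 hj2 => ?_⟩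
    have h3 := h2 j' (List.mem_range.mpr hj2)
    simp only [decide_eq_true_eq] at h3
    exact h3 hj1
  · rintro ⟨h1, h2⟩
    refine ⟨h1, fun j' hj => ?_⟩
    simp only [decide_eq_true_eq]
    exact fun hj1 => h2 j' hj1 (List.mem_range.mp hj)

lemma aliveB_iff_runlen (lst : List Int) (t : Int) (i k : Nat) (hi : i ≤ lst.length) :
    aliveB lst t i k = true ↔ k ≤ runlen lst t i := by
  obtain ⟨h1, h2, h3⟩ := lpN_char lst t i hi 1
  rw [aliveB_iff, runlen]
  constructor
  · rintro ⟨hk, hall⟩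
    by_contra hlt
    have hj0 : i - k < lpN lst t i 1 := by omega
    have := h3 (by omega)
    exact this (by simpa using hall (lpN lst t i 1 - 1) (by omega) (by omega))
  · intro hk
    refine ⟨by omega, fun j' hj1 hj2 => ?_⟩
    simpa using h2 j' (by omega) hj2

lemma aliveB_succ (lst : List Int) (t : Int) (i k : Nat) (hk : 1 ≤ k) :
    aliveB lst t i k = (aliveB lst t i (k-1) && (decide (k ≤ i) && decide (sp lst (i-k) i ≤ t))) := by
  have hiff : (aliveB lst t i k = true) ↔
      ((aliveB lst t i (k-1) && (decide (k ≤ i) && decide (sp lst (i-k) i ≤ t))) = true) := by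
    simp only [Bool.and_eq_true, decide_eq_true_eq, aliveB_iff]
    constructor
    · rintro ⟨hk1, hall⟩
      exact ⟨⟨by omega, fun j' hj1 hj2 => hall j' (by omega) hj2⟩,
        ⟨hk1, hall (i-k) (le_refl _) (by omega)⟩⟩
    · rintro ⟨⟨hk0, hall⟩, hk1, hsp⟩
      refine ⟨hk1, fun j' hj1 hj2 => ?_⟩
      rcases Nat.eq_or_lt_of_le hj1 with heq | hlt
      · rw [← heq]; exact hsp
      · exact hall j' (by omega) hj2
  exact Bool.eq_iff_iff.mpr hiff

-- the still-alive window ends at level k, in ascending order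
def ends (lst : List Int) (t : Int) (n k : Nat) : List Nat :=
  (List.range' 1 n).filter (fun i => aliveB lst t i k)

def aliveMap (lst : List Int) (t : Int) (n k : Nat) : List (Int × Int) :=
  (ends lst t n k).map (fun i : Nat => ((i : Int), sp lst (i - k) i))

-- the common value: the best run length over all ends
def bestM (lst : List Int) (t : Int) (n : Nat) : Nat :=
  (List.range' 1 n).foldl (fun a i => max a (runlen lst t i)) 0

lemma pyRange_eq_range' (n : Nat) :
    PySem.List.pyRange 1 ((n : Int) + 1) 1 = (List.range' 1 n).map (fun i : Nat => (i : Int)) := by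
  induction n with
  | zero => simp [PySem.List.pyRange]
  | succ n ih =>
    rw [show ((n+1 : Nat) : Int) + 1 = ((n : Int) + 1) + 1 by push_cast; ring,
      PySem.List.pyRange_one_succ_right (by omega), ih, List.range'_1_concat, List.map_append]
    simp only [List.map_cons, List.map_nil]
    congr 2
    omega

-- one round of B's frontier: grow every alive window ending at each i from length k-1 to k
lemma level_eq (lst : List Int) (t : Int) (n k : Nat) (hn : n = lst.length) (hk : 1 ≤ k) :
    lp_level lst t (k : Int) (aliveMap lst t n (k-1)) = aliveMap lst t n k := by
  unfold lp_level aliveMap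
  rw [List.foldl_map]
  simp only []
  have hcong : ∀ (acc : List (Int × Int)) (i : Nat), i ∈ ends lst t n (k-1) →
      (fun (nxt : List (Int × Int)) (i : Nat) =>
        if (i : Int) - (k : Int) ≥ 0 then
          (if sp lst (i - (k-1)) i * PySem.List.pyGetD lst ((i : Int) - k) 0 ≤ t then
            nxt ++ [((i : Int), sp lst (i - (k-1)) i * PySem.List.pyGetD lst ((i : Int) - k) 0)]
          else nxt)
        else nxt) acc i
      = (fun (nxt : List (Int × Int)) (i : Nat) =>
          if (k ≤ i ∧ sp lst (i-k) i ≤ t) then nxt ++ [((i : Int), sp lst (i-k) i)] else nxt)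
          acc i := by
    intro acc i hi
    have hmem := List.mem_filter.mp hi
    have hrange := List.mem_range'_1.mp hmem.1
    simp only []
    by_cases hki : k ≤ i
    · rw [if_pos (show (i : Int) - (k : Int) ≥ 0 by omega)]
      rw [show (i : Int) - (k : Int) = ((i - k : Nat) : Int) by omega, PySem.List.pyGetD_natCast]
      have hklen : i - k < lst.length := by omega
      have hprod : sp lst (i-(k-1)) i * lst.getD (i-k) 0 = sp lst (i-k) i := by
        rw [sp_cons lst (i-k) i (by omega) hklen, show (i-k)+1 = i-(k-1) by omega]
        ring
      rw [hprod]
      by_cases hsp : sp lst (i-k) i ≤ t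
      · rw [if_pos hsp, if_pos ⟨hki, hsp⟩]
      · rw [if_neg hsp, if_neg (by tauto)]
    · rw [if_neg (show ¬ ((i : Int) - (k : Int) ≥ 0) by omega), if_neg (by tauto)]
  rw [PySem.List.foldl_congr_mem _ _
    (fun (nxt : List (Int × Int)) (i : Nat) =>
      if (k ≤ i ∧ sp lst (i-k) i ≤ t) then nxt ++ [((i : Int), sp lst (i-k) i)] else nxt)
    _ hcong]
  rw [PySem.List.foldl_append_ite (fun i : Nat => k ≤ i ∧ sp lst (i-k) i ≤ t)
    (fun i : Nat => ((i : Int), sp lst (i-k) i)) _ []]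
  rw [List.nil_append]
  unfold ends
  rw [List.filter_filter]
  congr 1
  apply List.filter_congr
  intro i hi
  rw [aliveB_succ lst t i k hk,
    show (decide (k ≤ i ∧ sp lst (i - k) i ≤ t))
      = (decide (k ≤ i) && decide (sp lst (i-k) i ≤ t)) from by simp]
  exact Bool.and_comm _ _

-- generic running-max facts, specialised to the runlen projection
lemma foldl_max_le (f : Nat → Nat) (b : Nat) :
    ∀ (xs : List Nat) (a : Nat), a ≤ b → (∀ x ∈ xs, f x ≤ b) →
      xs.foldl (fun acc y => max acc (f y)) a ≤ b
  | [], a, ha, _ => ha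
  | x :: xs, a, ha, h => by
    simp only [List.foldl_cons]
    exact foldl_max_le f b xs _ (by have := h x (by simp); omega)
      (fun y hy => h y (by simp [hy]))

lemma foldl_max_attain (f : Nat → Nat) :
    ∀ (xs : List Nat) (a : Nat),
      xs.foldl (fun acc y => max acc (f y)) a = a ∨
        ∃ x ∈ xs, xs.foldl (fun acc y => max acc (f y)) a = f x
  | [], a => Or.inl rfl
  | x :: xs, a => by
    simp only [List.foldl_cons]
    rcases foldl_max_attain f xs (max a (f x)) with h | ⟨y, hy, h⟩
    · rcases Nat.le_or_le a (f x) with hle | hle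
      · exact Or.inr ⟨x, by simp, by omega⟩
      · exact Or.inl (by omega)
    · exact Or.inr ⟨y, by simp [hy], h⟩

lemma bestM_le (lst : List Int) (t : Int) (n : Nat) : bestM lst t n ≤ n := by
  unfold bestM
  apply foldl_max_le _ n _ _ (by omega)
  intro x hx
  have := (List.mem_range'_1.mp hx).2
  have h2 : runlen lst t x ≤ x := Nat.sub_le _ _
  omega

lemma ends_nonempty_iff (lst : List Int) (t : Int) (n k : Nat) (hn : n = lst.length)
    (hk : 1 ≤ k) : ends lst t n k ≠ [] ↔ k ≤ bestM lst t n := by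
  unfold ends
  constructor
  · intro hne
    have hex : ∃ i ∈ List.range' 1 n, aliveB lst t i k = true := by
      by_contra hall
      push_neg at hall
      exact hne (List.filter_eq_nil_iff.mpr (by
        intro a ha
        simp only [Bool.not_eq_true]
        exact Bool.not_eq_true _ |>.mp (hall a ha)))
    obtain ⟨i, hi, hal⟩ := hex
    have hirange := List.mem_range'_1.mp hi
    have hk_run := (aliveB_iff_runlen lst t i k (by omega)).mp hal
    have hle := (PySem.List.le_foldl_max_nat (List.range' 1 n) (runlen lst t) 0).2 i hi
    unfold bestM
    omega
  · intro hkM hnil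
    rcases foldl_max_attain (runlen lst t) (List.range' 1 n) 0 with h | ⟨i, hi, h⟩
    · unfold bestM at hkM
      rw [h] at hkM
      omega
    · have hirange := List.mem_range'_1.mp hi
      have hkr : k ≤ runlen lst t i := by
        unfold bestM at hkM
        omega
      have hal : aliveB lst t i k = true := (aliveB_iff_runlen lst t i k (by omega)).mpr hkr
      have hmem : i ∈ List.filter (fun i => aliveB lst t i k) (List.range' 1 n) :=
        List.mem_filter.mpr ⟨hi, hal⟩
      rw [hnil] at hmem
      exact absurd hmem List.not_mem_nil

-- B's loop, entered at level k with the level-(k-1) frontier, returns the best run length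
lemma loop_eq (lst : List Int) (t : Int) (n : Nat) (hn : n = lst.length) :
    ∀ d k : Nat, 1 ≤ k → k ≤ n+1 → n+1-k ≤ d → k-1 ≤ bestM lst t n →
      lp_loop lst t (PySem.List.pyRange (k : Int) ((n : Int)+1) 1) ((k : Int)-1)
          (aliveMap lst t n (k-1))
        = ((bestM lst t n : Nat) : Int) := by
  intro d
  induction d with
  | zero =>
    intro k h1 h2 hd hm
    have hk : k = n+1 := by omega
    subst hk
    rw [show ((n+1 : Nat) : Int) = (n : Int) + 1 by push_cast; ring,
      show PySem.List.pyRange ((n : Int)+1) ((n : Int)+1) 1 = [] from by simp [PySem.List.pyRange]]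
    simp only [lp_loop]
    have hbn : bestM lst t n ≤ n := bestM_le lst t n
    omega
  | succ d ih =>
    intro k h1 h2 hd hm
    rcases Nat.lt_or_ge k (n+1) with hkn | hkn
    · rw [PySem.List.pyRange_one_cons (show (k : Int) < (n : Int)+1 by omega)]
      simp only [lp_loop]
      rw [level_eq lst t n k hn h1]
      by_cases hne : aliveMap lst t n k = []
      · rw [if_pos hne]
        have hends : ends lst t n k = [] := by
          unfold aliveMap at hne
          exact List.map_eq_nil_iff.mp hne
        have hlt : ¬ (k ≤ bestM lst t n) :=
          fun hc => ((ends_nonempty_iff lst t n k hn h1).mpr hc) hends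
        omega
      · rw [if_neg hne]
        have hkM : k ≤ bestM lst t n := (ends_nonempty_iff lst t n k hn h1).mp
          (fun hnil => hne (by unfold aliveMap; rw [hnil]; rfl))
        have hrec := ih (k+1) (by omega) (by omega) (by omega) (by omega)
        simp only [Nat.cast_add, Nat.cast_one, add_sub_cancel_right] at hrec
        exact hrec
    · have hk : k = n+1 := by omega
      subst hk
      rw [show ((n+1 : Nat) : Int) = (n : Int) + 1 by push_cast; ring,
        show PySem.List.pyRange ((n : Int)+1) ((n : Int)+1) 1 = [] from by simp [PySem.List.pyRange]]
      simp only [lp_loop]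
      have hbn : bestM lst t n ≤ n := bestM_le lst t n
      omega

-- A's outer loop is the running max of the per-end run lengths
lemma A_fold (lst : List Int) (t : Int) :
    ∀ nn : Nat, nn ≤ lst.length → ∀ a : Nat,
      (PySem.List.pyRange 1 ((nn : Int) + 1) 1).foldl
        (fun m i =>
          let j := long_prod_inner lst t i.toNat 1
          if i - j > m then i - j else m) ((a : Nat) : Int)
      = (((List.range' 1 nn).foldl (fun b i => max b (runlen lst t i)) a : Nat) : Int) := by
  intro nn
  induction nn with
  | zero => intro _ a; simp [PySem.List.pyRange]
  | succ nn ih =>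
    intro h a
    rw [show ((nn+1 : Nat) : Int) + 1 = ((nn : Int) + 1) + 1 by push_cast; ring,
      PySem.List.pyRange_one_succ_right (by omega), List.foldl_append, ih (by omega) a,
      List.range'_1_concat, List.foldl_append]
    simp only [List.foldl_cons, List.foldl_nil]
    have htn : ((nn : Int) + 1).toNat = nn + 1 := by omega
    simp only [htn, lp_inner_eq]
    have hle : lpN lst t (nn+1) 1 ≤ nn+1 := (lpN_char lst t (nn+1) (by omega) 1).1
    rw [show (1 + nn) = nn + 1 by omega]
    unfold runlen
    split_ifs with hc <;> omega

-- ===== VERDICT (by name: the statement is the Claim_ definition above) =====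
theorem long_prod_spec : Claim_equal_long_prod := by
  intro lst t _
  unfold Spec_long_prod
  have hA : long_prod lst t = ((bestM lst t lst.length : Nat) : Int) := by
    have h := A_fold lst t lst.length (le_refl _) 0
    simp only [Nat.cast_zero] at h
    exact h
  have hinit : (PySem.List.pyRange 1 ((lst.length : Int) + 1) 1).map (fun i => (i, (1 : Int)))
      = aliveMap lst t lst.length 0 := by
    rw [pyRange_eq_range', List.map_map]
    unfold aliveMap ends
    have hfil : (List.range' 1 lst.length).filter (fun i => aliveB lst t i 0)
        = List.range' 1 lst.length := by
      apply List.filter_eq_self.mpr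
      intro i _
      rw [aliveB_iff]
      exact ⟨Nat.zero_le _, fun j' hj1 hj2 => absurd hj2 (by omega)⟩
    rw [hfil]
    apply List.map_congr_left
    intro i _
    simp [sp_self]
  have hB : long_prod_alt lst t = ((bestM lst t lst.length : Nat) : Int) := by
    unfold long_prod_alt
    rw [hinit]
    have h := loop_eq lst t lst.length rfl lst.length 1 (le_refl _) (by omega) (by omega)
      (by omega)
    simp only [Nat.cast_one] at h
    rw [show (0 : Int) = (1 : Int) - 1 by ring]
    exact h
  rw [hA, hB]
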